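-- pv_equiv track=rewrite | github.com/eliottcassidy2000/math | 04-computation/alpha_full_p11.py | enumerate_cycle_vertex_sets
-- ===== SOURCE A (Python) =====
-- from itertools import combinations
--
-- def has_ham_cycle(A, verts):
--     k = len(verts)
--     if k == 3:
--         a, b, c = verts
--         return (A[a][b] * A[b][c] * A[c][a] + A[a][c] * A[c][b] * A[b][a]) > 0
--     dp = set()
--     dp.add((1 << 0, 0))
--     for mask in range(1, 1 << k):
--         if not (mask & 1):
--             continue
--         for v in range(k):
--             if not (mask & (1 << v)):
--                 continue
--             if (mask, v) not in dp:
--                 continue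
--             for w in range(k):
--                 if mask & (1 << w):
--                     continue
--                 if A[verts[v]][verts[w]]:
--                     dp.add((mask | (1 << w), w))
--     full = (1 << k) - 1
--     for v in range(1, k):
--         if (full, v) in dp and A[verts[v]][verts[0]]:
--             return True
--     return False
--
-- def enumerate_cycle_vertex_sets(A, p):
--     """All odd-cycle vertex sets."""
--     by_k = {}
--     for k in range(3, p + 1, 2):
--         sets_k = []
--         for subset in combinations(range(p), k):
--             if has_ham_cycle(A, list(subset)):
--                 sets_k.append(frozenset(subset))
--         by_k[k] = sets_k
--     return by_k
-- ===== SOURCE B (Python) =====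
-- from itertools import combinations
--
-- def has_ham_cycle(A, verts):
--     k = len(verts)
--     if k == 3:
--         a, b, c = verts
--         return (A[a][b] * A[b][c] * A[c][a] + A[a][c] * A[c][b] * A[b][a]) > 0
--
--     def dfs(visited, cur):
--         if len(visited) == k:
--             return bool(A[verts[cur]][verts[0]])
--         for w in range(k):
--             if w not in visited and A[verts[cur]][verts[w]]:
--                 if dfs(visited | {w}, w):
--                     return True
--         return False
--
--     return dfs({0}, 0)
--
-- def enumerate_cycle_vertex_sets(A, p):
--     """All odd-cycle vertex sets."""
--     return {k: [frozenset(c) for c in combinations(range(p), k)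
--                 if has_ham_cycle(A, list(c))]
--             for k in range(3, p + 1, 2)}
-- ===== Notes on version B (the rewrite author's own statement) =====
-- stated objective: simpler
-- what changed: has_ham_cycle's Held-Karp bitmask DP over all 2^k masks is replaced by a recursive backtracking DFS from verts[0] that extends a visited set along truthy edges and closes the cycle at the end (the k==3 branch is kept verbatim, and the enumeration becomes a dict/list comprehension).
import Mathlib
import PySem

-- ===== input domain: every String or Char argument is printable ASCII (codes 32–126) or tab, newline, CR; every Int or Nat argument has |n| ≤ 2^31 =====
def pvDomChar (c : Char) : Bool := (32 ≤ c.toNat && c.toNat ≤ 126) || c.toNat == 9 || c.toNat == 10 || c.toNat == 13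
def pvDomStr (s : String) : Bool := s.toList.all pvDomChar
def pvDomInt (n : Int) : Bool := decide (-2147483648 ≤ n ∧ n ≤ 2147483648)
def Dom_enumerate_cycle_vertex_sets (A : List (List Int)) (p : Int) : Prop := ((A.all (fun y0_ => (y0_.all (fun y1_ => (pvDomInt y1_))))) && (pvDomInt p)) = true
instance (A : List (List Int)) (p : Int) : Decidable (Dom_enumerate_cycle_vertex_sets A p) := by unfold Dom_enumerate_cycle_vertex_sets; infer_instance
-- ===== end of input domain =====

-- B replaces A's Held–Karp bitmask DP inside has_ham_cycle by a recursive backtracking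
-- DFS (and writes the enumeration as a comprehension); objective: simpler.

-- ===== PORT A =====

-- A[i][j] for the in-range nonnegative indices the programs use (Pre_ excludes the raising inputs)
def pvIdx (A : List (List Int)) (i j : Int) : Int :=
  PySem.List.pyGetD (PySem.List.pyGetD A i []) j 0

-- the k == 3 branch, textually identical in A and B
def pvTri (A : List (List Int)) (verts : List Int) : Bool :=
  let a := verts.getD 0 0
  let b := verts.getD 1 0
  let c := verts.getD 2 0
  decide (pvIdx A a b * pvIdx A b c * pvIdx A c a + pvIdx A a c * pvIdx A c b * pvIdx A b a > 0)

-- the adjacency test 'A[verts[v]][verts[w]]' (truthiness), used by both ports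
def pvAdj (A : List (List Int)) (verts : List Int) (v w : Nat) : Bool :=
  decide (pvIdx A (verts.getD v 0) (verts.getD w 0) ≠ 0)

-- itertools.combinations(xs, n) in lexicographic order
def pvCombos : Nat → List Int → List (List Int)
  | 0, _ => [[]]
  | _ + 1, [] => []
  | n + 1, x :: rest => (pvCombos n rest).map (fun s => x :: s) ++ pvCombos (n + 1) rest

-- innermost w-loop of A's DP
def pvDpW (adj : Nat → Nat → Bool) (k mask v : Nat) (dp : PySem.Set (Nat × Nat)) : PySem.Set (Nat × Nat) :=
  (List.range k).foldl (fun dp w =>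
    if mask &&& (1 <<< w) ≠ 0 then dp
    else if adj v w then PySem.Set.add dp (mask ||| (1 <<< w), w)
    else dp) dp

-- v-loop of A's DP
def pvDpV (adj : Nat → Nat → Bool) (k mask : Nat) (dp : PySem.Set (Nat × Nat)) : PySem.Set (Nat × Nat) :=
  (List.range k).foldl (fun dp v =>
    if mask &&& (1 <<< v) = 0 then dp
    else if (mask, v) ∈ dp then pvDpW adj k mask v dp
    else dp) dp

-- one outer iteration ('if not (mask & 1): continue')
def pvDpMask (adj : Nat → Nat → Bool) (k : Nat) (dp : PySem.Set (Nat × Nat)) (mask : Nat) : PySem.Set (Nat × Nat) :=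
  if mask &&& 1 = 0 then dp else pvDpV adj k mask dp

-- dp after processing masks 1..n ('for mask in range(1, 1 << k)' is n = 2^k - 1)
def pvDpUpTo (adj : Nat → Nat → Bool) (k n : Nat) : PySem.Set (Nat × Nat) :=
  (List.range' 1 n).foldl (pvDpMask adj k) (PySem.Set.add PySem.Set.empty (1, 0))

-- the DP part of has_ham_cycle (k ≠ 3)
def pvHamDP (adj : Nat → Nat → Bool) (k : Nat) : Bool :=
  let dp := pvDpUpTo adj k (2 ^ k - 1)
  (List.range' 1 (k - 1)).any (fun v => decide ((2 ^ k - 1, v) ∈ dp) && adj v 0)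

-- has_ham_cycle of A
def pvHamA (A : List (List Int)) (verts : List Int) : Bool :=
  let k := verts.length
  if k = 3 then pvTri A verts else pvHamDP (pvAdj A verts) k

def enumerate_cycle_vertex_sets (A : List (List Int)) (p : Int) : List (Int × List (List Int)) :=
  (PySem.List.pyRange 3 (p + 1) 2).foldl (fun by_k k =>
    by_k ++ [(k, (pvCombos k.toNat (PySem.List.pyRange 0 p 1)).foldl
      (fun sets_k s => if pvHamA A s then sets_k ++ [s] else sets_k) [])]) []

-- ===== PORT B =====

-- the backtracking DFS of B's has_ham_cycle
def pvDfs (adj : Nat → Nat → Bool) (k : Nat) : Nat → PySem.Set Nat → Nat → Bool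
  | fuel, visited, cur =>
    if visited.length = k then adj cur 0
    else match fuel with
      | 0 => false
      | fuel + 1 => (List.range k).any (fun w =>
          !decide (w ∈ visited) && adj cur w && pvDfs adj k fuel (PySem.Set.add visited w) w)

-- has_ham_cycle of B
def pvHamB (A : List (List Int)) (verts : List Int) : Bool :=
  let k := verts.length
  if k = 3 then pvTri A verts
  else pvDfs (pvAdj A verts) k k (PySem.Set.add PySem.Set.empty 0) 0

def enumerate_cycle_vertex_sets_alt (A : List (List Int)) (p : Int) : List (Int × List (List Int)) :=
  (PySem.List.pyRange 3 (p + 1) 2).map (fun k =>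
    (k, (pvCombos k.toNat (PySem.List.pyRange 0 p 1)).filter (fun s => pvHamB A s)))

-- ===== PRECONDITION & SPEC =====

-- Pre_ excludes exactly the inputs on which the Python raises IndexError: when p ≥ 3 every
-- off-diagonal pair A[i][j] (i ≠ j < p) is read, so A needs p rows, rows 0..p-2 need length ≥ p
-- and row p-1 needs length ≥ p-1; for p ≤ 2 nothing is indexed.
def Pre_enumerate_cycle_vertex_sets (A : List (List Int)) (p : Int) : Prop :=
  p ≤ 2 ∨ (p.toNat ≤ A.length ∧ (∀ i < p.toNat - 1, p.toNat ≤ (A.getD i []).length)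
            ∧ p.toNat - 1 ≤ (A.getD (p.toNat - 1) []).length)
instance (A : List (List Int)) (p : Int) : Decidable (Pre_enumerate_cycle_vertex_sets A p) := by
  unfold Pre_enumerate_cycle_vertex_sets; infer_instance

def pvWitness_enumerate_cycle_vertex_sets : List (List Int) × Int :=
  ([[0, 1, 0], [0, 0, 1], [1, 0]], 3)

def Spec_enumerate_cycle_vertex_sets (A : List (List Int)) (p : Int) (out : List (Int × List (List Int))) : Prop := out = enumerate_cycle_vertex_sets_alt A p
instance (A : List (List Int)) (p : Int) (out : List (Int × List (List Int))) : Decidable (Spec_enumerate_cycle_vertex_sets A p out) := by unfold Spec_enumerate_cycle_vertex_sets; infer_instance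

-- ===== CLAIM (what is proved, stated in full; the proofs are below) =====
def Claim_equal_enumerate_cycle_vertex_sets : Prop := ∀ (A : List (List Int)) (p : Int), Dom_enumerate_cycle_vertex_sets A p → Pre_enumerate_cycle_vertex_sets A p → Spec_enumerate_cycle_vertex_sets A p (enumerate_cycle_vertex_sets A p)

-- ===== LEMMAS AND PROOFS =====

inductive pvReach (adj : Nat → Nat → Bool) (k : Nat) : Nat → Nat → Prop where
  | base : pvReach adj k 1 0
  | step {m v w : Nat} : pvReach adj k m v → w < k → m &&& (1 <<< w) = 0 →
      adj v w = true → pvReach adj k (m ||| (1 <<< w)) w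

inductive pvExt (adj : Nat → Nat → Bool) (k : Nat) : Nat → Nat → Prop where
  | stop {v : Nat} : adj v 0 = true → pvExt adj k (2 ^ k - 1) v
  | step {m v w : Nat} : w < k → m &&& (1 <<< w) = 0 → adj v w = true →
      pvExt adj k (m ||| (1 <<< w)) w → pvExt adj k m v

theorem pv_band_shift_ne (m w : Nat) : (m &&& (1 <<< w) ≠ 0) ↔ m.testBit w := by
  simp [Nat.testBit, Nat.one_shiftLeft, Nat.and_two_pow, Nat.shiftRight_eq_div_pow]

theorem pv_testBit_or_shift (m w i : Nat) :
    (m ||| (1 <<< w)).testBit i = (m.testBit i || decide (i = w)) := by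
  simp [Nat.testBit_or, Nat.one_shiftLeft, Nat.testBit_two_pow, eq_comm]

theorem pvReach_inv {adj : Nat → Nat → Bool} {k m v : Nat} (hk : 0 < k)
    (h : pvReach adj k m v) :
    v < k ∧ m.testBit 0 ∧ m.testBit v ∧ m < 2 ^ k ∧ (v = 0 → m = 1) := by
  induction h with
  | base => exact ⟨hk, by decide, by decide, Nat.one_lt_two_pow_iff.mpr (by omega), fun _ => rfl⟩
  | @step m v w hr hw hbit hadj ih =>
    obtain ⟨hvk, hb0, hbv, hlt, hz⟩ := ih
    refine ⟨hw, ?_, ?_, ?_, ?_⟩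
    · rw [pv_testBit_or_shift]; simp [hb0]
    · rw [pv_testBit_or_shift]; simp
    · have h2 : (1 <<< w) < 2 ^ k := by
        simpa [Nat.one_shiftLeft] using Nat.pow_lt_pow_right (a := 2) (by omega) hw
      exact Nat.or_lt_two_pow hlt h2
    · intro h0; subst h0
      exact absurd hbit ((pv_band_shift_ne m 0).mpr (by simp [hb0]))

-- generic fold lemmas
theorem pv_foldl_mono {α β : Type} {f : List β → α → List β}
    (hmono : ∀ dp x y, y ∈ dp → y ∈ f dp x) :
    ∀ (l : List α) (dp : List β) (y : β), y ∈ dp → y ∈ l.foldl f dp := by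
  intro l
  induction l with
  | nil => intro dp y hy; simpa using hy
  | cons a l ih => intro dp y hy; exact ih (f dp a) y (hmono dp a y hy)

theorem pv_foldl_hit {α β : Type} {f : List β → α → List β}
    (hmono : ∀ dp x y, y ∈ dp → y ∈ f dp x) {x : α} {y : β} :
    ∀ {l : List α} {dp0 : List β}, x ∈ l →
      (∀ dp', (∀ u ∈ dp0, u ∈ dp') → y ∈ f dp' x) →
      y ∈ l.foldl f dp0 := by
  intro l
  induction l with
  | nil => intro dp0 hx; simp at hx
  | cons a l ih =>
    intro dp0 hx hy
    rcases List.mem_cons.mp hx with rfl | hx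
    · exact pv_foldl_mono hmono l (f dp0 x) y (hy dp0 (fun _ h => h))
    · exact ih hx (fun dp' hsub => hy dp' (fun u hu => hsub u (hmono dp0 a u hu)))

theorem pvDpW_mono (adj : Nat → Nat → Bool) (k mask v : Nat) :
    ∀ (dp : PySem.Set (Nat × Nat)) (y), y ∈ dp → y ∈ pvDpW adj k mask v dp := by
  intro dp y hy
  unfold pvDpW
  refine pv_foldl_mono ?_ _ _ _ hy
  intro dp w y hy
  split_ifs with h1 h2 <;> simp [PySem.Set.mem_add, hy]

theorem pvDpV_mono (adj : Nat → Nat → Bool) (k mask : Nat) :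
    ∀ (dp : PySem.Set (Nat × Nat)) (y), y ∈ dp → y ∈ pvDpV adj k mask dp := by
  intro dp y hy
  unfold pvDpV
  refine pv_foldl_mono ?_ _ _ _ hy
  intro dp v y hy
  split_ifs with h1 h2
  · exact hy
  · exact pvDpW_mono adj k mask v dp y hy
  · exact hy

theorem pvDpMask_mono (adj : Nat → Nat → Bool) (k : Nat) :
    ∀ (dp : PySem.Set (Nat × Nat)) (mask : Nat) (y), y ∈ dp → y ∈ pvDpMask adj k dp mask := by
  intro dp mask y hy
  unfold pvDpMask
  split_ifs
  · exact hy
  · exact pvDpV_mono adj k mask dp y hy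

theorem pv_range'_split {n n' : Nat} (h : n ≤ n') :
    List.range' 1 n' = List.range' 1 n ++ List.range' (1 + n) (n' - n) := by
  conv_lhs => rw [show n' = (n' - n) + n from by omega]
  rw [← List.range'_append]
  norm_num
  omega

theorem pvDpUpTo_mono {adj : Nat → Nat → Bool} {k : Nat} {n n' : Nat} (h : n ≤ n')
    {y : Nat × Nat} (hy : y ∈ pvDpUpTo adj k n) : y ∈ pvDpUpTo adj k n' := by
  unfold pvDpUpTo at *
  rw [pv_range'_split h, List.foldl_append]
  exact pv_foldl_mono (fun dp mask y hy => pvDpMask_mono adj k dp mask y hy) _ _ _ hy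

theorem pvDpW_sound {adj : Nat → Nat → Bool} {k mask v : Nat}
    (dp : PySem.Set (Nat × Nat)) (hdp : ∀ y ∈ dp, pvReach adj k y.1 y.2)
    (hrv : pvReach adj k mask v) :
    ∀ y ∈ pvDpW adj k mask v dp, pvReach adj k y.1 y.2 := by
  unfold pvDpW
  refine List.foldlRecOn _ _ (motive := fun (dp : PySem.Set (Nat × Nat)) => ∀ y ∈ dp, pvReach adj k y.1 y.2) hdp ?_
  intro dp' hdp' w hw
  split_ifs with hb hadj
  · exact hdp'
  · intro y hy
    rcases (PySem.Set.mem_add _ _ _).mp hy with hy | rfl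
    · exact hdp' y hy
    · exact pvReach.step hrv (List.mem_range.mp hw) (by omega) hadj
  · exact hdp'

theorem pvDpV_sound {adj : Nat → Nat → Bool} {k mask : Nat}
    (dp : PySem.Set (Nat × Nat)) (hdp : ∀ y ∈ dp, pvReach adj k y.1 y.2) :
    ∀ y ∈ pvDpV adj k mask dp, pvReach adj k y.1 y.2 := by
  unfold pvDpV
  refine List.foldlRecOn _ _ (motive := fun (dp : PySem.Set (Nat × Nat)) => ∀ y ∈ dp, pvReach adj k y.1 y.2) hdp ?_
  intro dp' hdp' v hv
  split_ifs with h1 h2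
  · exact hdp'
  · exact pvDpW_sound dp' hdp' (by simpa using hdp' _ h2)
  · exact hdp'

theorem pvDpMask_sound {adj : Nat → Nat → Bool} {k : Nat} (mask : Nat)
    (dp : PySem.Set (Nat × Nat)) (hdp : ∀ y ∈ dp, pvReach adj k y.1 y.2) :
    ∀ y ∈ pvDpMask adj k dp mask, pvReach adj k y.1 y.2 := by
  unfold pvDpMask
  split_ifs
  · exact hdp
  · exact pvDpV_sound dp hdp

theorem pvDp_sound {adj : Nat → Nat → Bool} {k : Nat} (n : Nat) :
    ∀ y ∈ pvDpUpTo adj k n, pvReach adj k y.1 y.2 := by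
  unfold pvDpUpTo
  induction n with
  | zero =>
    intro y hy
    simp [PySem.Set.add, PySem.Set.empty] at hy
    simp [hy]; exact pvReach.base
  | succ n ih =>
    intro y hy
    rw [List.range'_1_concat, List.foldl_append] at hy
    simp only [List.foldl_cons, List.foldl_nil] at hy
    exact pvDpMask_sound (1 + n) _ ih y hy

-- completeness of the DP
theorem pvDp_step_hit {adj : Nat → Nat → Bool} {k m v w : Nat}
    (hb0 : m.testBit 0) (hbv : m.testBit v) (hvk : v < k) (hwk : w < k)
    (hbit : m &&& (1 <<< w) = 0) (hadj : adj v w = true)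
    {dp : PySem.Set (Nat × Nat)} (hmem : (m, v) ∈ dp) :
    (m ||| (1 <<< w), w) ∈ pvDpMask adj k dp m := by
  unfold pvDpMask
  rw [if_neg (by simpa using (pv_band_shift_ne m 0).mpr hb0)]
  unfold pvDpV
  refine pv_foldl_hit ?_ (x := v) (List.mem_range.mpr hvk) ?_
  · intro dp v' y hy
    split_ifs with h1 h2
    · exact hy
    · exact pvDpW_mono adj k m v' dp y hy
    · exact hy
  · intro dp' hsub
    beta_reduce
    rw [if_neg (by simpa using (pv_band_shift_ne m v).mpr hbv), if_pos (hsub _ hmem)]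
    unfold pvDpW
    refine pv_foldl_hit ?_ (x := w) (List.mem_range.mpr hwk) ?_
    · intro dp w' y hy
      split_ifs with h1 h2 <;> simp [PySem.Set.mem_add, hy]
    · intro dp'' hsub2
      beta_reduce
      rw [if_neg (by simp [hbit]), if_pos hadj]
      simp [PySem.Set.mem_add]

theorem pvDp_complete {adj : Nat → Nat → Bool} {k : Nat} (hk : 0 < k) {m v : Nat}
    (h : pvReach adj k m v) : (m, v) ∈ pvDpUpTo adj k (m - 1) := by
  induction h with
  | base => simp [pvDpUpTo, PySem.Set.add, PySem.Set.empty]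
  | @step m v w hr hwk hbit hadj ih =>
    obtain ⟨hvk, hb0, hbv, hlt, _⟩ := pvReach_inv hk hr
    have hm1 : 1 ≤ m := by
      have h0 := hb0; rw [Nat.testBit_zero] at h0; simp at h0; omega
    have hltor : m < m ||| (1 <<< w) := by
      refine lt_of_le_of_ne Nat.left_le_or ?_
      intro heq
      have hbw : (m ||| (1 <<< w)).testBit w = true := by
        rw [pv_testBit_or_shift]; simp
      rw [← heq] at hbw
      exact absurd hbit ((pv_band_shift_ne m w).mpr (by simp [hbw]))
    unfold pvDpUpTo
    rw [pv_range'_split (n := m - 1) (n' := (m ||| (1 <<< w)) - 1) (by omega),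
        List.foldl_append, show 1 + (m - 1) = m from by omega]
    refine pv_foldl_hit (fun dp mask y hy => pvDpMask_mono adj k dp mask y hy)
      (x := m) ?_ ?_
    · rw [List.mem_range'_1]; omega
    · intro dp' hsub
      exact pvDp_step_hit hb0 hbv hvk hwk hbit hadj (hsub _ ih)

theorem pvDp_mem_iff {adj : Nat → Nat → Bool} {k : Nat} (hk : 0 < k) (m v : Nat) :
    ((m, v) ∈ pvDpUpTo adj k (2 ^ k - 1)) ↔ pvReach adj k m v := by
  constructor
  · intro h; exact pvDp_sound _ _ h
  · intro h
    have hlt := (pvReach_inv hk h).2.2.2.1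
    exact pvDpUpTo_mono (by omega) (pvDp_complete hk h)

-- bridges between Reach, Ext and the two answers
theorem pvReach_ext {adj : Nat → Nat → Bool} {k m v : Nat} (h : pvReach adj k m v) :
    pvExt adj k m v → pvExt adj k 1 0 := by
  induction h with
  | base => exact id
  | step hr hw hbit hadj ih => intro he; exact ih (pvExt.step hw hbit hadj he)

theorem pvExt_close {adj : Nat → Nat → Bool} {k : Nat} (hk2 : 2 ≤ k) {m v : Nat}
    (he : pvExt adj k m v) :
    pvReach adj k m v →
      ∃ v', 1 ≤ v' ∧ v' < k ∧ pvReach adj k (2 ^ k - 1) v' ∧ adj v' 0 = true := by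
  induction he with
  | @stop v hadj =>
    intro hr
    have hinv := pvReach_inv (by omega) hr
    refine ⟨v, ?_, hinv.1, hr, hadj⟩
    rcases Nat.eq_zero_or_pos v with rfl | h1
    · exfalso
      have hm := hinv.2.2.2.2 rfl
      have h4 : 4 ≤ 2 ^ k := by
        calc (4 : Nat) = 2 ^ 2 := rfl
        _ ≤ 2 ^ k := Nat.pow_le_pow_right (by omega) hk2
      omega
    · exact h1
  | @step m v w hw hbit hadj he ih => intro hr; exact ih (pvReach.step hr hw hbit hadj)

theorem pvHamDP_iff {adj : Nat → Nat → Bool} {k : Nat} (hk2 : 2 ≤ k) :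
    (pvHamDP adj k = true) ↔ pvExt adj k 1 0 := by
  unfold pvHamDP
  simp only [List.any_eq_true, Bool.and_eq_true, decide_eq_true_eq]
  constructor
  · rintro ⟨v, hvmem, hdp, hadj⟩
    have hr := (pvDp_mem_iff (by omega) _ _).mp hdp
    exact pvReach_ext hr (pvExt.stop hadj)
  · intro he
    obtain ⟨v, h1, hvk, hr, hadj⟩ := pvExt_close hk2 he pvReach.base
    refine ⟨v, ?_, (pvDp_mem_iff (by omega) _ _).mpr hr, hadj⟩
    rw [List.mem_range'_1]; omega

-- the visited set of B's DFS as a bitmask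
def pvMaskOf (S : List Nat) : Nat := S.foldl (fun m w => m ||| (1 <<< w)) 0

theorem pvMaskOf_append (S : List Nat) (w : Nat) :
    pvMaskOf (S ++ [w]) = pvMaskOf S ||| (1 <<< w) := by
  simp [pvMaskOf]

theorem pvMaskOf_testBit (S : List Nat) (i : Nat) : (pvMaskOf S).testBit i ↔ i ∈ S := by
  have gen : ∀ (S : List Nat) (acc : Nat),
      (S.foldl (fun m w => m ||| (1 <<< w)) acc).testBit i ↔ acc.testBit i ∨ i ∈ S := by
    intro S
    induction S with
    | nil => intro acc; simp
    | cons w S ih =>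
      intro acc
      simp only [List.foldl_cons, ih, pv_testBit_or_shift, List.mem_cons,
        Bool.or_eq_true, decide_eq_true_eq]
      tauto
  have := gen S 0
  simpa [pvMaskOf] using this

theorem pv_len_le {k : Nat} {S : List Nat} (hnd : S.Nodup) (hb : ∀ x ∈ S, x < k) :
    S.length ≤ k := by
  have hsub : S.toFinset ⊆ Finset.range k := by
    intro x hx
    exact Finset.mem_range.mpr (hb x (List.mem_toFinset.mp hx))
  calc S.length = S.toFinset.card := (List.toFinset_card_of_nodup hnd).symm
  _ ≤ (Finset.range k).card := Finset.card_le_card hsub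
  _ = k := Finset.card_range k

theorem pvMaskOf_full {k : Nat} {S : List Nat} (hnd : S.Nodup) (hb : ∀ x ∈ S, x < k)
    (hlen : S.length = k) : pvMaskOf S = 2 ^ k - 1 := by
  have hmem : ∀ i < k, i ∈ S := by
    intro i hi
    have hsub : S.toFinset ⊆ Finset.range k := by
      intro x hx
      exact Finset.mem_range.mpr (hb x (List.mem_toFinset.mp hx))
    have hcard : (Finset.range k).card ≤ S.toFinset.card := by
      rw [List.toFinset_card_of_nodup hnd, hlen, Finset.card_range]
    have heq := Finset.eq_of_subset_of_card_le hsub hcard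
    have : i ∈ S.toFinset := by rw [heq]; exact Finset.mem_range.mpr hi
    exact List.mem_toFinset.mp this
  apply Nat.eq_of_testBit_eq
  intro i
  rw [Nat.testBit_two_pow_sub_one]
  by_cases hik : i < k
  · simp [hik, (pvMaskOf_testBit S i).mpr (hmem i hik)]
  · simp only [hik, decide_false]
    by_contra hne
    simp only [Bool.not_eq_false] at hne
    exact hik (hb i ((pvMaskOf_testBit S i).mp hne))

theorem pvExt_cases {adj : Nat → Nat → Bool} {k m v : Nat} (h : pvExt adj k m v) :
    (m = 2 ^ k - 1 ∧ adj v 0 = true) ∨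
      ∃ w, w < k ∧ m &&& (1 <<< w) = 0 ∧ adj v w = true ∧ pvExt adj k (m ||| (1 <<< w)) w := by
  cases h with
  | stop h => exact Or.inl ⟨rfl, h⟩
  | step hw hbit hadj he => exact Or.inr ⟨_, hw, hbit, hadj, he⟩

theorem pv_full_band {k w : Nat} (hw : w < k) : (2 ^ k - 1) &&& (1 <<< w) ≠ 0 :=
  (pv_band_shift_ne _ _).mpr (by simp [Nat.testBit_two_pow_sub_one, hw])

theorem pvDfs_full_iff {adj : Nat → Nat → Bool} {k : Nat} (visited : List Nat) (cur : Nat)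
    (hnd : visited.Nodup) (hb : ∀ x ∈ visited, x < k) (hlen : visited.length = k) :
    (adj cur 0 = true) ↔ pvExt adj k (pvMaskOf visited) cur := by
  rw [pvMaskOf_full hnd hb hlen]
  constructor
  · exact pvExt.stop
  · intro h
    rcases pvExt_cases h with ⟨_, h⟩ | ⟨w, hw, hbit, _⟩
    · exact h
    · exact absurd hbit (pv_full_band hw)

theorem pvDfs_iff {adj : Nat → Nat → Bool} {k : Nat} :
    ∀ (fuel : Nat) (visited : PySem.Set Nat) (cur : Nat), visited.Nodup →
      (∀ x ∈ visited, x < k) → k - visited.length ≤ fuel →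
      (pvDfs adj k fuel visited cur = true ↔ pvExt adj k (pvMaskOf visited) cur) := by
  intro fuel
  induction fuel with
  | zero =>
    intro visited cur hnd hb hlen
    have hfull : visited.length = k := le_antisymm (pv_len_le hnd hb) (by omega)
    rw [show pvDfs adj k 0 visited cur = adj cur 0 from by simp [pvDfs, hfull]]
    exact pvDfs_full_iff visited cur hnd hb hfull
  | succ fuel ih =>
    intro visited cur hnd hb hlen
    by_cases hfull : visited.length = k
    · rw [show pvDfs adj k (fuel + 1) visited cur = adj cur 0 from by simp [pvDfs, hfull]]
      exact pvDfs_full_iff visited cur hnd hb hfull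
    · have hlt : visited.length < k := lt_of_le_of_ne (pv_len_le hnd hb) hfull
      have hne : pvMaskOf visited ≠ 2 ^ k - 1 := by
        obtain ⟨i, hik, hiS⟩ : ∃ i, i < k ∧ i ∉ visited := by
          by_contra hc
          push Not at hc
          have hsub : Finset.range k ⊆ visited.toFinset := by
            intro x hx
            exact List.mem_toFinset.mpr (hc x (Finset.mem_range.mp hx))
          have : k ≤ visited.length := by
            calc k = (Finset.range k).card := (Finset.card_range k).symm
            _ ≤ visited.toFinset.card := Finset.card_le_card hsub
            _ ≤ visited.length := visited.toFinset_card_le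
          omega
        intro he
        have := congrArg (fun n => n.testBit i) he
        simp only [Nat.testBit_two_pow_sub_one, hik, decide_true] at this
        exact hiS ((pvMaskOf_testBit _ _).mp (by simpa using this))
      rw [show pvDfs adj k (fuel + 1) visited cur
            = (List.range k).any (fun w =>
                !decide (w ∈ visited) && adj cur w && pvDfs adj k fuel (PySem.Set.add visited w) w)
          from by simp [pvDfs, hfull]]
      simp only [List.any_eq_true, Bool.and_eq_true, Bool.not_eq_true', decide_eq_false_iff_not]
      constructor
      · rintro ⟨w, hwmem, ⟨hwvis, hadj⟩, hrec⟩
        have hwk := List.mem_range.mp hwmem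
        have hadd : PySem.Set.add visited w = visited ++ [w] := PySem.Set.add_of_not_mem hwvis
        have hrec' := (ih (PySem.Set.add visited w) w
            (by rw [hadd]; simp [List.nodup_append, hnd]; exact fun a ha h => hwvis (h ▸ ha))
            (by rw [hadd]; intro x hx; rcases List.mem_append.mp hx with h | h
                · exact hb x h
                · simp at h; omega)
            (by rw [hadd]; simp; omega)).mp hrec
        rw [hadd, pvMaskOf_append] at hrec'
        have hbit0 : pvMaskOf visited &&& (1 <<< w) = 0 := by
          by_contra hne0
          exact hwvis ((pvMaskOf_testBit _ _).mp ((pv_band_shift_ne _ _).mp hne0))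
        exact pvExt.step hwk hbit0 hadj hrec'
      · intro he
        rcases pvExt_cases he with ⟨hfull', _⟩ | ⟨w, hwk, hbit, hadj, hext⟩
        · exact absurd hfull' hne
        · have hwvis : w ∉ visited := fun hmem =>
            absurd hbit (by
              simpa using (pv_band_shift_ne _ w).mpr ((pvMaskOf_testBit _ _).mpr hmem))
          refine ⟨w, List.mem_range.mpr hwk, ⟨hwvis, hadj⟩, ?_⟩
          have hadd : PySem.Set.add visited w = visited ++ [w] := PySem.Set.add_of_not_mem hwvis
          refine (ih (PySem.Set.add visited w) w
            (by rw [hadd]; simp [List.nodup_append, hnd]; exact fun a ha h => hwvis (h ▸ ha))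
            (by rw [hadd]; intro x hx; rcases List.mem_append.mp hx with h | h
                · exact hb x h
                · simp at h; omega)
            (by rw [hadd]; simp; omega)).mpr ?_
          rw [hadd, pvMaskOf_append]
          exact hext

-- the two has_ham_cycle's agree on vertex lists of length ≥ 2
theorem pvHamEq (A : List (List Int)) (verts : List Int) (h2 : 2 ≤ verts.length) :
    pvHamA A verts = pvHamB A verts := by
  unfold pvHamA pvHamB
  by_cases h3 : verts.length = 3
  · simp [h3]
  · simp only [h3, if_false]
    rw [show PySem.Set.add PySem.Set.empty (0 : Nat) = [0] from rfl]
    rw [Bool.eq_iff_iff, pvHamDP_iff h2]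
    rw [pvDfs_iff (adj := pvAdj A verts) (k := verts.length) verts.length [0] 0
      (by simp) (by intro x hx; simp at hx; omega) (by simp)]
    rw [show pvMaskOf [0] = 1 from rfl]

theorem pvCombos_length : ∀ (xs : List Int) (n : Nat), ∀ s ∈ pvCombos n xs, s.length = n := by
  intro xs
  induction xs with
  | nil =>
    intro n s hs
    cases n with
    | zero => simp [pvCombos] at hs; simp [hs]
    | succ n => simp [pvCombos] at hs
  | cons x rest ih =>
    intro n s hs
    cases n with
    | zero => simp [pvCombos] at hs; simp [hs]
    | succ n =>
      simp only [pvCombos, List.mem_append, List.mem_map] at hs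
      rcases hs with ⟨t, ht, rfl⟩ | hs
      · simp [ih n t ht]
      · exact ih (n + 1) s hs

theorem pv_enum_eq (A : List (List Int)) (p : Int) :
    enumerate_cycle_vertex_sets A p = enumerate_cycle_vertex_sets_alt A p := by
  unfold enumerate_cycle_vertex_sets enumerate_cycle_vertex_sets_alt
  rw [PySem.List.foldl_append_singleton_eq_map]
  simp only [List.nil_append]
  apply List.map_congr_left
  intro k hk
  have hk3 : 3 ≤ k := ((PySem.List.mem_pyRange_iff_of_pos (by omega) k).mp hk).1
  congr 1
  rw [PySem.List.foldl_append_if_eq_filter]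
  simp only [List.nil_append]
  apply List.filter_congr
  intro s hs
  have hlen := pvCombos_length _ _ s hs
  exact pvHamEq A s (by omega)

-- ===== VERDICT (by name: the statement is the Claim_ definition above) =====
theorem enumerate_cycle_vertex_sets_spec : Claim_equal_enumerate_cycle_vertex_sets := by
  intro A p _ _
  unfold Spec_enumerate_cycle_vertex_sets
  exact pv_enum_eq A p
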